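-- pv_equiv track=rewrite | github.com/uchenna-j-edeh/dailly_problems | ik_patterns/arrays/lexicography.py | solution
-- ===== SOURCE A (Python) =====
-- def solution(s, t):
--     s_new_str = ''
--     count = 0
--     for i in range(len(s)):
--         if s[i].isdigit():
--             # s_new_str += s[i]
--             if s_new_str + s[i+1:] < t:
--                 count += 1
--
--         s_new_str += s[i]
--
--
--
--     t_new_str = ''
--     for j in range(len(t)):
--         if t[j].isdigit():
--             if s < t_new_str + t[j+1:]:
--                 count += 1
--
--         t_new_str += t[j]
--
--
--     return count
-- ===== SOURCE B (Python) =====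
-- def solution(s, t):
--     n, m = len(s), len(t)
--     # p = length of the longest common prefix of s and t
--     p = 0
--     while p < n and p < m and s[p] == t[p]:
--         p += 1
--     # dsign = outcome of comparing s and t at the first mismatch (0 iff s == t)
--     if p < n and p < m:
--         dsign = -1 if s[p] < t[p] else 1
--     elif p < n:
--         dsign = 1
--     elif p < m:
--         dsign = -1
--     else:
--         dsign = 0
--     count = 0
--     cur = 0  # cmp(s[i+1:], t[i:]) maintained while i walks down
--     for i in range(n - 1, -1, -1):
--         if i + 1 >= n:
--             cur = -1 if i < m else 0
--         elif i >= m: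
--             cur = 1
--         else:
--             c, d = s[i + 1], t[i]
--             cur = ((-1 if c < d else 1) if c != d else cur)
--         if s[i].isdigit() and ((cur == -1) if i <= p else (dsign == -1)):
--             count += 1
--     cur = 0  # cmp(s[j:], t[j+1:]) maintained while j walks down
--     for j in range(m - 1, -1, -1):
--         if j >= n:
--             cur = -1 if j + 1 < m else 0
--         elif j + 1 >= m:
--             cur = 1
--         else:
--             c, d = s[j], t[j + 1]
--             cur = ((-1 if c < d else 1) if c != d else cur)
--         if t[j].isdigit() and ((cur == -1) if j <= p else (dsign == -1)):
--             count += 1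
--     return count
-- ===== Notes on version B (the rewrite author's own statement) =====
-- stated objective: alternative
-- what changed: A rebuilds the growing prefix string and compares a freshly concatenated candidate string against the other string at every digit position; B instead computes the common-prefix length and first-mismatch sign once, then walks each string backwards maintaining the suffix comparison as a running three-way value, deciding each deletion from those precomputed values.
import Mathlib
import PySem

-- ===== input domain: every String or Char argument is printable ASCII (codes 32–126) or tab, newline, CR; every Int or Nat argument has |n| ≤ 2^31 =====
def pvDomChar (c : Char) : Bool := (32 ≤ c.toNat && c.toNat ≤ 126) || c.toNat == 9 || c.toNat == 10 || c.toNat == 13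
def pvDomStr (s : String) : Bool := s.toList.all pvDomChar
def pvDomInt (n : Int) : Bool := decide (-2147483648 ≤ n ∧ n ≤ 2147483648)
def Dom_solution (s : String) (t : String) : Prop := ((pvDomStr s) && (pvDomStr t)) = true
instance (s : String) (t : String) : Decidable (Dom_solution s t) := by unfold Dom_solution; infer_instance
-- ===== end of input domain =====

-- B replaces A's rebuild-the-prefix-and-compare-slices loops by one common-prefix scan plus two
-- backward passes that maintain the suffix comparison as a running three-way value (alternative
-- algorithm; not measured faster on the generated inputs).

-- ===== PORT A =====
-- loop body of A's first loop: state = (s_new_str, count)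
def stepAS (sl tl : List Char) (st : List Char × Int) (i : Nat) : List Char × Int :=
  let c := PySem.List.pyGetD sl (i : Int) ' '
  let cnt := if PySem.Chars.isdigit c &&
      decide (st.1 ++ PySem.List.slice sl (some ((i : Int) + 1)) none < tl) then st.2 + 1 else st.2
  (st.1 ++ [c], cnt)

-- loop body of A's second loop: state = (t_new_str, count)
def stepAT (sl tl : List Char) (st : List Char × Int) (j : Nat) : List Char × Int :=
  let c := PySem.List.pyGetD tl (j : Int) ' '
  let cnt := if PySem.Chars.isdigit c &&
      decide (sl < st.1 ++ PySem.List.slice tl (some ((j : Int) + 1)) none) then st.2 + 1 else st.2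
  (st.1 ++ [c], cnt)

def solution (s : String) (t : String) : Int :=
  let sl := s.toList
  let tl := t.toList
  let r1 := (List.range sl.length).foldl (stepAS sl tl) ([], 0)
  let r2 := (List.range tl.length).foldl (stepAT sl tl) ([], r1.2)
  r2.2

-- ===== PORT B =====
-- B's while loop computing the longest common prefix length, as structural recursion
def lcpLen : List Char → List Char → Nat
  | a :: as, b :: bs => if a == b then lcpLen as bs + 1 else 0
  | _, _ => 0

-- B's dsign: outcome of comparing s and t at the first mismatch (0 iff s == t)
def dsignOf (sl tl : List Char) : Int :=
  if lcpLen sl tl < sl.length ∧ lcpLen sl tl < tl.length then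
    if PySem.List.pyGetD sl (lcpLen sl tl : Int) ' ' <
        PySem.List.pyGetD tl (lcpLen sl tl : Int) ' ' then -1 else 1
  else if lcpLen sl tl < sl.length then 1
  else if lcpLen sl tl < tl.length then -1
  else 0

-- loop body of B's backward s-loop: state = (cur, count), cur = cmp(s[i+1:], t[i:])
def stepBS (sl tl : List Char) (p : Nat) (d : Int) (st : Int × Int) (i : Nat) : Int × Int :=
  let cur : Int :=
    if i + 1 ≥ sl.length then (if i < tl.length then -1 else 0)
    else if i ≥ tl.length then 1
    else
      let c := PySem.List.pyGetD sl ((i : Int) + 1) ' '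
      let e := PySem.List.pyGetD tl (i : Int) ' '
      if c ≠ e then (if c < e then -1 else 1) else st.1
  let cnt := if PySem.Chars.isdigit (PySem.List.pyGetD sl (i : Int) ' ') &&
      (if i ≤ p then cur == -1 else d == -1) then st.2 + 1 else st.2
  (cur, cnt)

-- loop body of B's backward t-loop: state = (cur, count), cur = cmp(s[j:], t[j+1:])
def stepBT (sl tl : List Char) (p : Nat) (d : Int) (st : Int × Int) (j : Nat) : Int × Int :=
  let cur : Int :=
    if j ≥ sl.length then (if j + 1 < tl.length then -1 else 0)
    else if j + 1 ≥ tl.length then 1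
    else
      let c := PySem.List.pyGetD sl (j : Int) ' '
      let e := PySem.List.pyGetD tl ((j : Int) + 1) ' '
      if c ≠ e then (if c < e then -1 else 1) else st.1
  let cnt := if PySem.Chars.isdigit (PySem.List.pyGetD tl (j : Int) ' ') &&
      (if j ≤ p then cur == -1 else d == -1) then st.2 + 1 else st.2
  (cur, cnt)

def solution_alt (s : String) (t : String) : Int :=
  let sl := s.toList
  let tl := t.toList
  let p := lcpLen sl tl
  let d := dsignOf sl tl
  let r1 := ((List.range sl.length).reverse).foldl (stepBS sl tl p d) (0, 0)
  let r2 := ((List.range tl.length).reverse).foldl (stepBT sl tl p d) (0, r1.2)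
  r2.2

-- ===== PRECONDITION & SPEC =====
def Spec_solution (s : String) (t : String) (out : Int) : Prop := out = solution_alt s t
instance (s : String) (t : String) (out : Int) : Decidable (Spec_solution s t out) := by unfold Spec_solution; infer_instance

-- ===== CLAIM (what is proved, stated in full; the proofs are below) =====
def Claim_equal_solution : Prop := ∀ (s : String) (t : String), Dom_solution s t → Spec_solution s t (solution s t)

-- ===== LEMMAS AND PROOFS =====

-- three-way lexicographic comparison of char lists (proof-side value of B's running `cur`)
def cmpL : List Char → List Char → Int
  | [], [] => 0
  | [], _ :: _ => -1
  | _ :: _, [] => 1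
  | a :: as, b :: bs => if a < b then -1 else if b < a then 1 else cmpL as bs

-- per-index conditions counted by A's loops
def condAs (sl tl : List Char) (i : Nat) : Bool :=
  PySem.Chars.isdigit (PySem.List.pyGetD sl (i : Int) ' ') &&
    decide (sl.take i ++ sl.drop (i + 1) < tl)

def condAt (sl tl : List Char) (j : Nat) : Bool :=
  PySem.Chars.isdigit (PySem.List.pyGetD tl (j : Int) ' ') &&
    decide (sl < tl.take j ++ tl.drop (j + 1))

-- per-index conditions counted by B's loops
def condBs (sl tl : List Char) (i : Nat) : Bool :=
  PySem.Chars.isdigit (PySem.List.pyGetD sl (i : Int) ' ') &&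
    (if i ≤ lcpLen sl tl then cmpL (sl.drop (i + 1)) (tl.drop i) == -1 else dsignOf sl tl == -1)

def condBt (sl tl : List Char) (j : Nat) : Bool :=
  PySem.Chars.isdigit (PySem.List.pyGetD tl (j : Int) ' ') &&
    (if j ≤ lcpLen sl tl then cmpL (sl.drop j) (tl.drop (j + 1)) == -1 else dsignOf sl tl == -1)

theorem lcpLen_le_left : ∀ (x y : List Char), lcpLen x y ≤ x.length := by
  intro x
  induction x with
  | nil => intro y; cases y <;> simp [lcpLen]
  | cons a as ih =>
    intro y
    cases y with
    | nil => simp [lcpLen]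
    | cons b bs =>
      simp only [lcpLen, List.length_cons]
      split <;> [exact Nat.succ_le_succ (ih bs); omega]

theorem lcpLen_le_right : ∀ (x y : List Char), lcpLen x y ≤ y.length := by
  intro x
  induction x with
  | nil => intro y; cases y <;> simp [lcpLen]
  | cons a as ih =>
    intro y
    cases y with
    | nil => simp [lcpLen]
    | cons b bs =>
      simp only [lcpLen, List.length_cons]
      split <;> [exact Nat.succ_le_succ (ih bs); omega]

theorem take_eq_of_le_lcp : ∀ (x y : List Char) (i : Nat), i ≤ lcpLen x y → x.take i = y.take i := by
  intro x
  induction x with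
  | nil =>
    intro y i h
    cases y <;> simp [lcpLen] at h <;> simp [h]
  | cons a as ih =>
    intro y i h
    cases y with
    | nil => simp [lcpLen] at h; simp [h]
    | cons b bs =>
      simp only [lcpLen] at h
      by_cases hab : a = b
      · simp [hab] at h
        cases i with
        | zero => simp
        | succ i' =>
          simp only [List.take_succ_cons, hab]
          rw [ih bs i' (by omega)]
      · simp [hab] at h; simp [h]

theorem cmpL_self : ∀ (x : List Char), cmpL x x = 0 := by
  intro x
  induction x with
  | nil => rfl
  | cons a as ih => simp [cmpL, ih]

theorem cmpL_eq_neg_one_iff : ∀ (x y : List Char), cmpL x y = -1 ↔ x < y := by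
  intro x
  induction x with
  | nil =>
    intro y
    cases y with
    | nil => simp [cmpL]
    | cons b bs => simp [cmpL, List.nil_lt_cons]
  | cons a as ih =>
    intro y
    cases y with
    | nil => simp [cmpL, List.not_lt_nil]
    | cons b bs =>
      simp only [cmpL, List.cons_lt_cons_iff]
      rcases lt_trichotomy a b with h | h | h
      · simp [h]
      · simp [h, ih bs]
      · simp [not_lt_of_gt h, h, ne_of_gt h]

theorem cmpL_take_ne : ∀ (k : Nat) (x y : List Char),
    cmpL (x.take k) (y.take k) ≠ 0 → cmpL x y = cmpL (x.take k) (y.take k) := by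
  intro k
  induction k with
  | zero => intro x y h; simp [cmpL] at h
  | succ k ih =>
    intro x y h
    cases x with
    | nil =>
      cases y with
      | nil => simp [cmpL] at h
      | cons b bs => simp [cmpL]
    | cons a as =>
      cases y with
      | nil => simp [cmpL]
      | cons b bs =>
        simp only [List.take_succ_cons, cmpL] at h ⊢
        by_cases h1 : a < b
        · simp [h1]
        · by_cases h2 : b < a
          · simp [h1, h2]
          · simp only [if_neg h1, if_neg h2] at h ⊢
            exact ih as bs h

theorem cmpL_take_eq : ∀ (k : Nat) (x y : List Char),
    cmpL (x.take k) (y.take k) = 0 → cmpL x y = cmpL (x.drop k) (y.drop k) := by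
  intro k
  induction k with
  | zero => intro x y _; simp
  | succ k ih =>
    intro x y h
    cases x with
    | nil =>
      cases y with
      | nil => simp
      | cons b bs => simp [cmpL] at h
    | cons a as =>
      cases y with
      | nil => simp [cmpL] at h
      | cons b bs =>
        simp only [List.take_succ_cons, cmpL] at h
        simp only [List.drop_succ_cons, cmpL]
        split at h
        · omega
        · split at h
          · omega
          · rename_i h1 h2
            simp only [if_neg h1, if_neg h2]
            exact ih as bs h

theorem dsignOf_cons (a : Char) (as bs : List Char) :
    dsignOf (a :: as) (a :: bs) = dsignOf as bs := by
  have hc : lcpLen (a :: as) (a :: bs) = lcpLen as bs + 1 := by simp [lcpLen]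
  simp only [dsignOf, hc, List.length_cons, PySem.List.pyGetD_natCast, List.getD_cons_succ,
    Nat.add_lt_add_iff_right]

theorem cmpL_take_gt : ∀ (x y : List Char) (i : Nat),
    lcpLen x y < i → cmpL (x.take i) (y.take i) = dsignOf x y := by
  intro x
  induction x with
  | nil =>
    intro y i h
    cases y with
    | nil => simp [dsignOf, lcpLen, cmpL]
    | cons b bs =>
      simp only [lcpLen] at h
      obtain ⟨i', rfl⟩ : ∃ i', i = i' + 1 := ⟨i - 1, by omega⟩
      simp [dsignOf, lcpLen, cmpL]
  | cons a as ih =>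
    intro y i h
    cases y with
    | nil =>
      simp only [lcpLen] at h
      obtain ⟨i', rfl⟩ : ∃ i', i = i' + 1 := ⟨i - 1, by omega⟩
      simp [dsignOf, lcpLen, cmpL]
    | cons b bs =>
      by_cases hab : a = b
      · subst hab
        simp only [lcpLen, beq_self_eq_true, if_true] at h
        obtain ⟨i', rfl⟩ : ∃ i', i = i' + 1 := ⟨i - 1, by omega⟩
        simp only [List.take_succ_cons, cmpL, if_neg (lt_irrefl a), dsignOf_cons]
        exact ih bs i' (by omega)
      · have hp : lcpLen (a :: as) (b :: bs) = 0 := by simp [lcpLen, hab]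
        obtain ⟨i', rfl⟩ : ∃ i', i = i' + 1 := ⟨i - 1, by omega⟩
        simp only [List.take_succ_cons, cmpL]
        rcases lt_trichotomy a b with hlt | heq | hgt
        · simp [hlt, dsignOf, hp]
        · exact absurd heq hab
        · simp [not_lt_of_gt hgt, hgt, dsignOf, hp]

theorem dsignOf_eq_zero : ∀ (x y : List Char), dsignOf x y = 0 →
    lcpLen x y = x.length ∧ lcpLen x y = y.length := by
  intro x y h
  unfold dsignOf at h
  have h1 : lcpLen x y ≤ x.length := lcpLen_le_left x y
  have h2 : lcpLen x y ≤ y.length := lcpLen_le_right x y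
  split at h
  · split at h <;> omega
  · split at h
    · omega
    · split at h <;> omega

theorem keyS (sl tl : List Char) (i : Nat) (hi : i < sl.length) :
    condAs sl tl i = condBs sl tl i := by
  unfold condAs condBs
  congr 1
  have hlen : (sl.take i).length = i := List.length_take_of_le (le_of_lt hi)
  have hub : (sl.take i ++ sl.drop (i + 1)).take i = sl.take i := by
    rw [List.take_append, hlen, Nat.sub_self, List.take_zero, List.append_nil,
      List.take_take, Nat.min_self]
  have hdrop : (sl.take i ++ sl.drop (i + 1)).drop i = sl.drop (i + 1) := by
    rw [List.drop_append, hlen, Nat.sub_self, List.drop_zero,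
      List.drop_take, Nat.sub_self, List.take_zero, List.nil_append]
  by_cases hle : i ≤ lcpLen sl tl
  · rw [if_pos hle]
    have h0 : cmpL ((sl.take i ++ sl.drop (i + 1)).take i) (tl.take i) = 0 := by
      rw [hub, take_eq_of_le_lcp sl tl i hle]; exact cmpL_self _
    have hc : cmpL (sl.take i ++ sl.drop (i + 1)) tl
        = cmpL (sl.drop (i + 1)) (tl.drop i) := by
      rw [cmpL_take_eq i _ tl h0, hdrop]
    rw [Bool.beq_eq_decide_eq, decide_eq_decide, ← hc, cmpL_eq_neg_one_iff]
  · rw [if_neg hle]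
    have hgt : lcpLen sl tl < i := by omega
    have h1 : cmpL ((sl.take i ++ sl.drop (i + 1)).take i) (tl.take i) = dsignOf sl tl := by
      rw [hub]; exact cmpL_take_gt sl tl i hgt
    have hne : dsignOf sl tl ≠ 0 := by
      intro h0
      obtain ⟨e1, _⟩ := dsignOf_eq_zero sl tl h0
      omega
    have hc : cmpL (sl.take i ++ sl.drop (i + 1)) tl = dsignOf sl tl := by
      rw [cmpL_take_ne i _ tl (by rw [h1]; exact hne), h1]
    rw [Bool.beq_eq_decide_eq, decide_eq_decide, ← hc, cmpL_eq_neg_one_iff]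

theorem keyT (sl tl : List Char) (j : Nat) (hj : j < tl.length) :
    condAt sl tl j = condBt sl tl j := by
  unfold condAt condBt
  congr 1
  have hlen : (tl.take j).length = j := List.length_take_of_le (le_of_lt hj)
  have hvb : (tl.take j ++ tl.drop (j + 1)).take j = tl.take j := by
    rw [List.take_append, hlen, Nat.sub_self, List.take_zero, List.append_nil,
      List.take_take, Nat.min_self]
  have hdrop : (tl.take j ++ tl.drop (j + 1)).drop j = tl.drop (j + 1) := by
    rw [List.drop_append, hlen, Nat.sub_self, List.drop_zero,
      List.drop_take, Nat.sub_self, List.take_zero, List.nil_append]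
  by_cases hle : j ≤ lcpLen sl tl
  · rw [if_pos hle]
    have h0 : cmpL (sl.take j) ((tl.take j ++ tl.drop (j + 1)).take j) = 0 := by
      rw [hvb, take_eq_of_le_lcp sl tl j hle]; exact cmpL_self _
    have hc : cmpL sl (tl.take j ++ tl.drop (j + 1))
        = cmpL (sl.drop j) (tl.drop (j + 1)) := by
      rw [cmpL_take_eq j sl _ h0, hdrop]
    rw [Bool.beq_eq_decide_eq, decide_eq_decide, ← hc, cmpL_eq_neg_one_iff]
  · rw [if_neg hle]
    have hgt : lcpLen sl tl < j := by omega
    have h1 : cmpL (sl.take j) ((tl.take j ++ tl.drop (j + 1)).take j) = dsignOf sl tl := by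
      rw [hvb]; exact cmpL_take_gt sl tl j hgt
    have hne : dsignOf sl tl ≠ 0 := by
      intro h0
      obtain ⟨_, e2⟩ := dsignOf_eq_zero sl tl h0
      omega
    have hc : cmpL sl (tl.take j ++ tl.drop (j + 1)) = dsignOf sl tl := by
      rw [cmpL_take_ne j sl _ (by rw [h1]; exact hne), h1]
    rw [Bool.beq_eq_decide_eq, decide_eq_decide, ← hc, cmpL_eq_neg_one_iff]

theorem foldAS (sl tl : List Char) : ∀ (k : Nat), k ≤ sl.length → ∀ (c : Int),
    (List.range k).foldl (stepAS sl tl) ([], c)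
      = (sl.take k, c + ((List.range k).countP (condAs sl tl) : Int)) := by
  intro k
  induction k with
  | zero => intro _ c; simp
  | succ k ih =>
    intro hk c
    have hk' : k < sl.length := by omega
    rw [List.range_succ, List.foldl_append, ih (by omega) c]
    have hslice : PySem.List.slice sl (some ((k : Int) + 1)) none = sl.drop (k + 1) := by
      have h1 : ((k : Int) + 1) = ((k + 1 : Nat) : Int) := by push_cast; ring
      rw [h1, PySem.List.slice_from_natCast]
    simp only [List.foldl_cons, List.foldl_nil, stepAS, hslice]
    have hget : PySem.List.pyGetD sl (k : Int) ' ' = sl[k] := by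
      rw [PySem.List.pyGetD_natCast]; exact List.getD_eq_getElem sl ' ' hk'
    have hcond : (PySem.Chars.isdigit (PySem.List.pyGetD sl (k : Int) ' ') &&
        decide (List.take k sl ++ List.drop (k + 1) sl < tl)) = condAs sl tl k := rfl
    rw [hcond, hget, List.take_succ_eq_append_getElem hk', List.countP_append,
      List.countP_cons, List.countP_nil]
    refine Prod.ext rfl ?_
    dsimp only
    split_ifs
    · push_cast; ring
    · push_cast; ring

theorem foldAT (sl tl : List Char) : ∀ (k : Nat), k ≤ tl.length → ∀ (c : Int),
    (List.range k).foldl (stepAT sl tl) ([], c)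
      = (tl.take k, c + ((List.range k).countP (condAt sl tl) : Int)) := by
  intro k
  induction k with
  | zero => intro _ c; simp
  | succ k ih =>
    intro hk c
    have hk' : k < tl.length := by omega
    rw [List.range_succ, List.foldl_append, ih (by omega) c]
    have hslice : PySem.List.slice tl (some ((k : Int) + 1)) none = tl.drop (k + 1) := by
      have h1 : ((k : Int) + 1) = ((k + 1 : Nat) : Int) := by push_cast; ring
      rw [h1, PySem.List.slice_from_natCast]
    simp only [List.foldl_cons, List.foldl_nil, stepAT, hslice]
    have hget : PySem.List.pyGetD tl (k : Int) ' ' = tl[k] := by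
      rw [PySem.List.pyGetD_natCast]; exact List.getD_eq_getElem tl ' ' hk'
    have hcond : (PySem.Chars.isdigit (PySem.List.pyGetD tl (k : Int) ' ') &&
        decide (sl < List.take k tl ++ List.drop (k + 1) tl)) = condAt sl tl k := rfl
    rw [hcond, hget, List.take_succ_eq_append_getElem hk', List.countP_append,
      List.countP_cons, List.countP_nil]
    refine Prod.ext rfl ?_
    dsimp only
    split_ifs
    · push_cast; ring
    · push_cast; ring

theorem curBS (sl tl : List Char) (k : Nat) (x : Int)
    (hx : k + 1 = sl.length ∨ x = cmpL (sl.drop (k + 2)) (tl.drop (k + 1))) :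
    (if k + 1 ≥ sl.length then (if k < tl.length then (-1 : Int) else 0)
     else if k ≥ tl.length then 1
     else
       if PySem.List.pyGetD sl ((k : Int) + 1) ' ' ≠ PySem.List.pyGetD tl (k : Int) ' ' then
         (if PySem.List.pyGetD sl ((k : Int) + 1) ' ' < PySem.List.pyGetD tl (k : Int) ' ' then -1 else 1)
       else x)
    = cmpL (sl.drop (k + 1)) (tl.drop k) := by
  by_cases hend : k + 1 ≥ sl.length
  · rw [if_pos hend]
    have hnil : sl.drop (k + 1) = [] := List.drop_eq_nil_of_le hend
    rw [hnil]
    by_cases hm : k < tl.length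
    · rw [if_pos hm]
      have hne : tl.drop k ≠ [] := by
        intro h; rw [List.drop_eq_nil_iff] at h; omega
      cases htl : tl.drop k with
      | nil => exact absurd htl hne
      | cons b bs => simp [cmpL]
    · rw [if_neg hm]
      have h0 : tl.drop k = [] := List.drop_eq_nil_of_le (by omega)
      rw [h0]; rfl
  · rw [if_neg hend]
    have hk2 : k + 1 < sl.length := by omega
    have hx' : x = cmpL (sl.drop (k + 2)) (tl.drop (k + 1)) := by
      cases hx with
      | inl h => omega
      | inr h => exact h
    have hsd : sl.drop (k + 1) = sl[k + 1] :: sl.drop (k + 2) := List.drop_eq_getElem_cons hk2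
    by_cases hm : k ≥ tl.length
    · rw [if_pos hm]
      have h0 : tl.drop k = [] := List.drop_eq_nil_of_le hm
      rw [h0, hsd]; rfl
    · rw [if_neg hm]
      have hm' : k < tl.length := by omega
      have htd : tl.drop k = tl[k] :: tl.drop (k + 1) := List.drop_eq_getElem_cons hm'
      have hg1 : PySem.List.pyGetD sl ((k : Int) + 1) ' ' = sl[k + 1] := by
        have h1 : ((k : Int) + 1) = ((k + 1 : Nat) : Int) := by push_cast; ring
        rw [h1, PySem.List.pyGetD_natCast]; exact List.getD_eq_getElem sl ' ' hk2
      have hg2 : PySem.List.pyGetD tl (k : Int) ' ' = tl[k] := by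
        rw [PySem.List.pyGetD_natCast]; exact List.getD_eq_getElem tl ' ' hm'
      rw [hg1, hg2, hsd, htd]
      show _ = if sl[k + 1] < tl[k] then (-1 : Int)
        else if tl[k] < sl[k + 1] then 1 else cmpL (sl.drop (k + 2)) (tl.drop (k + 1))
      rcases lt_trichotomy (sl[k + 1]) (tl[k]) with h | h | h
      · simp [h, ne_of_lt h]
      · simp [h, hx']
      · simp [ne_of_gt h, not_lt_of_gt h, h]

theorem curBT (sl tl : List Char) (k : Nat) (hk : k < tl.length) (x : Int)
    (hx : k + 1 = tl.length ∨ x = cmpL (sl.drop (k + 1)) (tl.drop (k + 2))) :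
    (if k ≥ sl.length then (if k + 1 < tl.length then (-1 : Int) else 0)
     else if k + 1 ≥ tl.length then 1
     else
       if PySem.List.pyGetD sl (k : Int) ' ' ≠ PySem.List.pyGetD tl ((k : Int) + 1) ' ' then
         (if PySem.List.pyGetD sl (k : Int) ' ' < PySem.List.pyGetD tl ((k : Int) + 1) ' ' then -1 else 1)
       else x)
    = cmpL (sl.drop k) (tl.drop (k + 1)) := by
  by_cases hend : k ≥ sl.length
  · rw [if_pos hend]
    have hnil : sl.drop k = [] := List.drop_eq_nil_of_le hend
    rw [hnil]
    by_cases hm : k + 1 < tl.length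
    · rw [if_pos hm]
      have hne : tl.drop (k + 1) ≠ [] := by
        intro h; rw [List.drop_eq_nil_iff] at h; omega
      cases htl : tl.drop (k + 1) with
      | nil => exact absurd htl hne
      | cons b bs => simp [cmpL]
    · rw [if_neg hm]
      have h0 : tl.drop (k + 1) = [] := List.drop_eq_nil_of_le (by omega)
      rw [h0]; rfl
  · rw [if_neg hend]
    have hkn : k < sl.length := by omega
    have hsd : sl.drop k = sl[k] :: sl.drop (k + 1) := List.drop_eq_getElem_cons hkn
    by_cases hm : k + 1 ≥ tl.length
    · rw [if_pos hm]
      have h0 : tl.drop (k + 1) = [] := List.drop_eq_nil_of_le hm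
      rw [h0, hsd]; rfl
    · rw [if_neg hm]
      have hm' : k + 1 < tl.length := by omega
      have hx' : x = cmpL (sl.drop (k + 1)) (tl.drop (k + 2)) := by
        cases hx with
        | inl h => omega
        | inr h => exact h
      have htd : tl.drop (k + 1) = tl[k + 1] :: tl.drop (k + 2) := List.drop_eq_getElem_cons hm'
      have hg1 : PySem.List.pyGetD sl (k : Int) ' ' = sl[k] := by
        rw [PySem.List.pyGetD_natCast]; exact List.getD_eq_getElem sl ' ' hkn
      have hg2 : PySem.List.pyGetD tl ((k : Int) + 1) ' ' = tl[k + 1] := by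
        have h1 : ((k : Int) + 1) = ((k + 1 : Nat) : Int) := by push_cast; ring
        rw [h1, PySem.List.pyGetD_natCast]; exact List.getD_eq_getElem tl ' ' hm'
      rw [hg1, hg2, hsd, htd]
      show _ = if sl[k] < tl[k + 1] then (-1 : Int)
        else if tl[k + 1] < sl[k] then 1 else cmpL (sl.drop (k + 1)) (tl.drop (k + 2))
      rcases lt_trichotomy (sl[k]) (tl[k + 1]) with h | h | h
      · simp [h, ne_of_lt h]
      · simp [h, hx']
      · simp [ne_of_gt h, not_lt_of_gt h, h]

theorem foldBS (sl tl : List Char) : ∀ (k : Nat), k ≤ sl.length → ∀ (x c : Int),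
    (k = sl.length ∨ x = cmpL (sl.drop (k + 1)) (tl.drop k)) →
    (((List.range k).reverse).foldl (stepBS sl tl (lcpLen sl tl) (dsignOf sl tl)) (x, c)).2
      = c + ((List.range k).countP (condBs sl tl) : Int) := by
  intro k
  induction k with
  | zero => intro _ x c _; simp
  | succ k ih =>
    intro hk x c hx
    have hrev : (List.range (k + 1)).reverse = k :: (List.range k).reverse := by
      simp [List.range_succ]
    have hx' : k + 1 = sl.length ∨ x = cmpL (sl.drop (k + 2)) (tl.drop (k + 1)) := by
      cases hx with
      | inl h => exact Or.inl (by omega)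
      | inr h => exact Or.inr h
    have hstep : stepBS sl tl (lcpLen sl tl) (dsignOf sl tl) (x, c) k
        = (cmpL (sl.drop (k + 1)) (tl.drop k),
           c + (if condBs sl tl k then 1 else 0)) := by
      unfold stepBS
      dsimp only
      rw [curBS sl tl k x hx']
      refine Prod.ext rfl ?_
      dsimp only
      have hcond : (PySem.Chars.isdigit (PySem.List.pyGetD sl (k : Int) ' ') &&
          (if k ≤ lcpLen sl tl then cmpL (sl.drop (k + 1)) (tl.drop k) == -1
           else dsignOf sl tl == -1)) = condBs sl tl k := rfl
      rw [hcond]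
      split_ifs <;> ring
    rw [hrev, List.foldl_cons, hstep, ih (by omega) _ _ (Or.inr rfl)]
    rw [List.range_succ, List.countP_append, List.countP_cons, List.countP_nil]
    split_ifs
    · push_cast; ring
    · push_cast; ring

theorem foldBT (sl tl : List Char) : ∀ (k : Nat), k ≤ tl.length → ∀ (x c : Int),
    (k = tl.length ∨ x = cmpL (sl.drop k) (tl.drop (k + 1))) →
    (((List.range k).reverse).foldl (stepBT sl tl (lcpLen sl tl) (dsignOf sl tl)) (x, c)).2
      = c + ((List.range k).countP (condBt sl tl) : Int) := by
  intro k
  induction k with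
  | zero => intro _ x c _; simp
  | succ k ih =>
    intro hk x c hx
    have hrev : (List.range (k + 1)).reverse = k :: (List.range k).reverse := by
      simp [List.range_succ]
    have hx' : k + 1 = tl.length ∨ x = cmpL (sl.drop (k + 1)) (tl.drop (k + 2)) := by
      cases hx with
      | inl h => exact Or.inl (by omega)
      | inr h => exact Or.inr h
    have hstep : stepBT sl tl (lcpLen sl tl) (dsignOf sl tl) (x, c) k
        = (cmpL (sl.drop k) (tl.drop (k + 1)),
           c + (if condBt sl tl k then 1 else 0)) := by
      unfold stepBT
      dsimp only
      rw [curBT sl tl k (by omega) x hx']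
      refine Prod.ext rfl ?_
      dsimp only
      have hcond : (PySem.Chars.isdigit (PySem.List.pyGetD tl (k : Int) ' ') &&
          (if k ≤ lcpLen sl tl then cmpL (sl.drop k) (tl.drop (k + 1)) == -1
           else dsignOf sl tl == -1)) = condBt sl tl k := rfl
      rw [hcond]
      split_ifs <;> ring
    rw [hrev, List.foldl_cons, hstep, ih (by omega) _ _ (Or.inr rfl)]
    rw [List.range_succ, List.countP_append, List.countP_cons, List.countP_nil]
    split_ifs
    · push_cast; ring
    · push_cast; ring

-- ===== VERDICT (by name: the statement is the Claim_ definition above) =====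
theorem solution_spec : Claim_equal_solution := by
  intro s t _
  unfold Spec_solution solution solution_alt
  dsimp only
  rw [foldAS s.toList t.toList s.toList.length le_rfl 0]
  rw [foldAT s.toList t.toList t.toList.length le_rfl]
  rw [foldBS s.toList t.toList s.toList.length le_rfl 0 0 (Or.inl rfl)]
  rw [foldBT s.toList t.toList t.toList.length le_rfl 0 _ (Or.inl rfl)]
  have h1 : (List.range s.toList.length).countP (condAs s.toList t.toList)
      = (List.range s.toList.length).countP (condBs s.toList t.toList) :=
    List.countP_congr (fun i hi => by
      rw [keyS s.toList t.toList i (List.mem_range.mp hi)])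
  have h2 : (List.range t.toList.length).countP (condAt s.toList t.toList)
      = (List.range t.toList.length).countP (condBt s.toList t.toList) :=
    List.countP_congr (fun j hj => by
      rw [keyT s.toList t.toList j (List.mem_range.mp hj)])
  dsimp only
  rw [h1, h2]
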